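-- pv_equiv track=rewrite | github.com/T3DStudio/DevNet | mpsg500_int_data/mpsg500.py | _InterfaceToKey
-- ===== SOURCE A (Python) =====
-- def _InterfaceToKey(istr):
--     str1 = ''
--     for ch in istr:
--         if ch.isdigit() or ch == '/':
--             str1 = str1 + ch
--     if str1 == '':
--         return ''
--     else:
--         secs = str1.split('/')
--         intkey = istr[0]
--         for str1 in secs:
--             strt = str1
--             while len(strt) < 3: strt = '0' + strt
--             intkey = intkey + strt
--     return intkey
-- ===== SOURCE B (Python) =====
-- def _InterfaceToKey(istr):
--     parts = []
--     cur = ''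
--     found = False
--     for ch in istr:
--         if ch.isdigit():
--             cur += ch
--             found = True
--         elif ch == '/':
--             parts.append(cur.zfill(3))
--             cur = ''
--             found = True
--     if not found:
--         return ''
--     parts.append(cur.zfill(3))
--     return istr[0] + ''.join(parts)
-- ===== Notes on version B (the rewrite author's own statement) =====
-- stated objective: alternative
-- what changed: A filters digits and slashes into a string, splits that on the slash character, then pads each piece with a while-loop; B makes a single left-to-right pass over the input, growing the current segment and emitting it zero-padded (zfill) as soon as a slash is seen, with a found flag replacing the emptiness test.
import Mathlib
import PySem

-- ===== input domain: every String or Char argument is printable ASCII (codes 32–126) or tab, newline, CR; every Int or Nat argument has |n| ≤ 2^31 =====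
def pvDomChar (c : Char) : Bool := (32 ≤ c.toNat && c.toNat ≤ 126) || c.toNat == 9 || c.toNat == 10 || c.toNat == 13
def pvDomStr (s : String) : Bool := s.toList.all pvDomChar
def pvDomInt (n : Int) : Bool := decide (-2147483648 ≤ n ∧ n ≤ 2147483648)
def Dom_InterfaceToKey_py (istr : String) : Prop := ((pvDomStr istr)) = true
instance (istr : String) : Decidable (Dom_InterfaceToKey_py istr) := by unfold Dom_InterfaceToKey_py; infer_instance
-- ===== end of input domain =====

-- B replaces A's filter-then-split-then-pad pipeline by a single left-to-right pass that
-- pads and emits each segment the moment a separator is seen (objective: alternative decomposition, same O(n) cost).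

-- ===== PORT A =====
-- the `while len(strt) < 3: strt = '0' + strt` loop of A
def padWhileA (strt : List Char) : List Char :=
  if strt.length < 3 then padWhileA ('0' :: strt) else strt
termination_by 3 - strt.length
decreasing_by simp at *; omega

def InterfaceToKey_py (istr : String) : String :=
  let str1 : List Char :=
    istr.toList.foldl
      (fun str1 ch => if PySem.Chars.isdigit ch || ch == '/' then str1 ++ [ch] else str1) []
  if str1 = [] then ""
  else
    let secs := PySem.Chars.splitOn str1 ['/']
    match PySem.List.pyGet? istr.toList 0 with
    | none => ""    -- unreachable: str1 ≠ [] forces istr ≠ ""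
    | some c =>
      String.ofList (secs.foldl (fun intkey s => intkey ++ padWhileA s) [c])

-- ===== PORT B =====
-- one step of B's single pass; state = (emitted padded segments, current segment, found flag)
def bStep (st : List (List Char) × List Char × Bool) (ch : Char) :
    List (List Char) × List Char × Bool :=
  if PySem.Chars.isdigit ch then (st.1, st.2.1 ++ [ch], true)
  else if ch == '/' then (st.1 ++ [PySem.Chars.zfill st.2.1 3], ([] : List Char), true)
  else st

def InterfaceToKey_py_alt (istr : String) : String :=
  let st := istr.toList.foldl bStep ([], [], false)
  if st.2.2 = false then ""
  else
    match PySem.List.pyGet? istr.toList 0 with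
    | none => ""    -- unreachable: found forces istr ≠ ""
    | some c =>
      -- istr[0] + ''.join(parts + [cur.zfill(3)])
      String.ofList (c :: (st.1 ++ [PySem.Chars.zfill st.2.1 3]).flatten)

-- ===== PRECONDITION & SPEC =====
def Spec_InterfaceToKey_py (istr : String) (out : String) : Prop := out = InterfaceToKey_py_alt istr
instance (istr : String) (out : String) : Decidable (Spec_InterfaceToKey_py istr out) := by unfold Spec_InterfaceToKey_py; infer_instance

-- ===== CLAIM (what is proved, stated in full; the proofs are below) =====
def Claim_equal_InterfaceToKey_py : Prop := ∀ (istr : String), Dom_InterfaceToKey_py istr → Spec_InterfaceToKey_py istr (InterfaceToKey_py istr)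

-- ===== LEMMAS AND PROOFS =====

-- the character test both programs react to
def pTest (ch : Char) : Bool := PySem.Chars.isdigit ch || ch == '/'

-- the two state updates B performs on a relevant character
def bInner (st : List (List Char) × List Char × Bool) (ch : Char) :
    List (List Char) × List Char × Bool :=
  if PySem.Chars.isdigit ch then (st.1, st.2.1 ++ [ch], true)
  else (st.1 ++ [PySem.Chars.zfill st.2.1 3], ([] : List Char), true)

-- prepend to the first piece
def addFirst (pre : List Char) : List (List Char) → List (List Char)
  | [] => [pre]
  | s :: t => (pre ++ s) :: t

-- structural characterisation of Python's split('/')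
def mysplit : List Char → List (List Char)
  | [] => [[]]
  | c :: rest => if c = '/' then [] :: mysplit rest else addFirst [c] (mysplit rest)

theorem mysplit_ne_nil (l : List Char) : mysplit l ≠ [] := by
  cases l with
  | nil => simp [mysplit]
  | cons c rest =>
    simp only [mysplit]
    split
    · simp
    · cases h : mysplit rest <;> simp [addFirst]

theorem addFirst_assoc (a b : List Char) (segs : List (List Char)) :
    addFirst a (addFirst b segs) = addFirst (a ++ b) segs := by
  cases segs <;> simp [addFirst]

theorem addFirst_nil (segs : List (List Char)) (h : segs ≠ []) : addFirst [] segs = segs := by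
  cases segs with
  | nil => exact absurd rfl h
  | cons s t => simp [addFirst]

theorem go_spec (fuel : Nat) : ∀ (l cur : List Char) (accs : List (List Char)),
    l.length ≤ fuel →
    PySem.Chars.splitOn.go ['/'] fuel l cur accs = accs.reverse ++ addFirst cur.reverse (mysplit l) := by
  induction fuel with
  | zero =>
    intro l cur accs h
    have : l = [] := by cases l <;> simp_all
    subst this
    simp [PySem.Chars.splitOn.go, addFirst, mysplit]
  | succ fuel ih =>
    intro l cur accs h
    cases l with
    | nil => simp [PySem.Chars.splitOn.go, addFirst, mysplit]
    | cons c rest =>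
      simp only [PySem.Chars.splitOn.go]
      by_cases hc : c = '/'
      · subst hc
        rw [if_pos (by simp [List.isPrefixOf])]
        rw [ih _ _ _ (by simpa using Nat.le_of_succ_le_succ (by simpa using h))]
        simp only [mysplit, addFirst]
        cases hm : mysplit rest with
        | nil => exact absurd hm (mysplit_ne_nil rest)
        | cons s t => simp [hm]
      · rw [if_neg (by simp [List.isPrefixOf]; exact fun hh => hc hh.symm)]
        rw [ih _ _ _ (by simpa using h)]
        simp [mysplit, hc, addFirst_assoc]

theorem splitOn_eq_mysplit (l : List Char) : PySem.Chars.splitOn l ['/'] = mysplit l := by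
  rw [PySem.Chars.splitOn, go_spec _ _ _ _ (by omega)]
  simp [addFirst_nil _ (mysplit_ne_nil l)]

theorem padWhileA_eq (s : List Char) :
    padWhileA s = List.replicate (3 - s.length) '0' ++ s := by
  fun_induction padWhileA s with
  | case1 s h ih =>
    rw [ih]
    have : 3 - s.length = (3 - ('0'::s).length) + 1 := by simp at *; omega
    rw [this, List.replicate_succ']
    simp
  | case2 s h =>
    have : 3 - s.length = 0 := by omega
    simp [this]

theorem zfill_eq_pad (s : List Char) (h : s.head? ≠ some '+' ∧ s.head? ≠ some '-') :
    PySem.Chars.zfill s 3 = List.replicate (3 - s.length) '0' ++ s := by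
  rw [PySem.Chars.zfill.eq_def]
  by_cases hl : (3:Int) ≤ s.length
  · rw [if_pos hl]
    have h0 : 3 - s.length = 0 := by omega
    simp [h0]
  · rw [if_neg hl]
    cases s with
    | nil => simp
    | cons c rest =>
      simp only [List.head?] at h
      have hc : ¬ (c = '+' ∨ c = '-') := by
        rintro (rfl | rfl) <;> simp at h
      simp only [if_neg hc]
      norm_num
      rfl

theorem mem_mysplit (l : List Char) : ∀ (s : List Char) (c : Char),
    s ∈ mysplit l → c ∈ s → c ∈ l ∧ c ≠ '/' := by
  induction l with
  | nil => intro s c hs hc; simp [mysplit] at hs; subst hs; simp at hc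
  | cons x rest ih =>
    intro s c hs hc
    by_cases hx : x = '/'
    · subst hx
      rw [show mysplit ('/' :: rest) = [] :: mysplit rest by simp [mysplit]] at hs
      rcases List.mem_cons.1 hs with rfl | hs
      · simp at hc
      · have := ih s c hs hc
        exact ⟨List.mem_cons_of_mem _ this.1, this.2⟩
    · simp only [mysplit, if_neg hx] at hs
      cases hm : mysplit rest with
      | nil => exact absurd hm (mysplit_ne_nil rest)
      | cons s0 t =>
        rw [hm] at hs
        simp only [addFirst, List.mem_cons] at hs
        rcases hs with rfl | hs
        · rcases List.mem_append.1 hc with h1 | h2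
          · simp at h1; subst h1; exact ⟨List.mem_cons_self, hx⟩
          · have := ih s0 c (by rw [hm]; exact List.mem_cons_self) h2
            exact ⟨List.mem_cons_of_mem _ this.1, this.2⟩
        · have := ih s c (by rw [hm]; exact List.mem_cons_of_mem _ hs) hc
          exact ⟨List.mem_cons_of_mem _ this.1, this.2⟩

theorem seg_pad (fs : List Char) (hall : ∀ c ∈ fs, pTest c = true)
    (s : List Char) (hs : s ∈ mysplit fs) : padWhileA s = PySem.Chars.zfill s 3 := by
  cases s with
  | nil => rw [padWhileA_eq, zfill_eq_pad] ; simp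
  | cons c t =>
    have hc := mem_mysplit fs _ c hs List.mem_cons_self
    have hp := hall c hc.1
    simp only [pTest, Bool.or_eq_true, beq_iff_eq] at hp
    have hd : PySem.Chars.isdigit c = true := by tauto
    have hplus : c ≠ '+' := by rintro rfl; simp [PySem.Chars.isdigit] at hd
    have hminus : c ≠ '-' := by rintro rfl; simp [PySem.Chars.isdigit] at hd
    rw [padWhileA_eq, zfill_eq_pad _ ⟨by simpa using hplus, by simpa using hminus⟩]

theorem bStep_found_true (fs : List Char) : ∀ (st : List (List Char) × List Char × Bool),
    st.2.2 = true → (fs.foldl bStep st).2.2 = true := by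
  induction fs with
  | nil => intro st h; simpa using h
  | cons c rest ih =>
    intro st h
    simp only [List.foldl_cons]
    apply ih
    simp only [bStep]
    split
    · rfl
    · split
      · rfl
      · exact h

theorem bStep_found (fs : List Char) (st : List (List Char) × List Char × Bool)
    (hall : ∀ c ∈ fs, pTest c = true) (hne : fs ≠ []) : (fs.foldl bStep st).2.2 = true := by
  cases fs with
  | nil => exact absurd rfl hne
  | cons c rest =>
    simp only [List.foldl_cons]
    apply bStep_found_true
    have hp := hall c List.mem_cons_self
    simp only [pTest, Bool.or_eq_true, beq_iff_eq] at hp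
    simp only [bStep]
    rcases hp with hp | hp
    · rw [if_pos hp]
    · split
      · rfl
      · simp [hp]

theorem B_fold (fs : List Char) : ∀ (parts : List (List Char)) (cur : List Char) (found : Bool),
    (∀ c ∈ fs, pTest c = true) →
    (fs.foldl bStep (parts, cur, found)).1 ++ [PySem.Chars.zfill (fs.foldl bStep (parts, cur, found)).2.1 3]
      = parts ++ (addFirst cur (mysplit fs)).map (fun s => PySem.Chars.zfill s 3) := by
  induction fs with
  | nil => intro parts cur found _; simp [mysplit, addFirst]
  | cons c rest ih =>
    intro parts cur found hall
    have hp := hall c List.mem_cons_self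
    have hall' : ∀ x ∈ rest, pTest x = true := fun x hx => hall x (List.mem_cons_of_mem _ hx)
    simp only [pTest, Bool.or_eq_true, beq_iff_eq] at hp
    by_cases hd : PySem.Chars.isdigit c = true
    · have hc : c ≠ '/' := by
        intro h; subst h; simp [PySem.Chars.isdigit] at hd
      simp only [List.foldl_cons, bStep, if_pos hd]
      rw [ih _ _ _ hall']
      rw [mysplit, if_neg hc, addFirst_assoc]
    · have hc : c = '/' := by tauto
      subst hc
      simp only [List.foldl_cons, bStep, if_neg hd]
      rw [if_pos (show (('/' : Char) == '/') = true by decide)]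
      rw [ih _ _ _ hall']
      rw [mysplit, if_pos rfl]
      cases hm : mysplit rest with
      | nil => exact absurd hm (mysplit_ne_nil rest)
      | cons s0 t => simp [addFirst]

theorem bStep_split : bStep = fun st ch => if pTest ch then bInner st ch else st := by
  funext st ch
  simp only [bStep, bInner, pTest]
  by_cases hd : PySem.Chars.isdigit ch = true
  · simp [hd]
  · by_cases hs : (ch == '/') = true <;> simp [hd, hs]

-- B's scan over the whole string equals its scan over the filtered string
theorem B_filter (l : List Char) :
    l.foldl bStep ([], [], false) = (l.filter pTest).foldl bStep ([], [], false) := by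
  conv_lhs => rw [bStep_split]
  rw [PySem.List.foldl_if_eq_foldl_filter]
  exact PySem.List.foldl_congr_mem _ bInner bStep ([], [], false) (fun acc x hx => by
    rw [bStep_split]
    simp [List.of_mem_filter hx])

-- ===== VERDICT (by name: the statement is the Claim_ definition above) =====
theorem InterfaceToKey_py_spec : Claim_equal_InterfaceToKey_py := by
  unfold Claim_equal_InterfaceToKey_py
  intro istr _
  unfold Spec_InterfaceToKey_py InterfaceToKey_py InterfaceToKey_py_alt
  simp only []
  have hA : istr.toList.foldl
      (fun str1 ch => if PySem.Chars.isdigit ch || ch == '/' then str1 ++ [ch] else str1) []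
      = istr.toList.filter pTest := by
    simpa [pTest] using
      (PySem.List.foldl_append_if_eq_filter (p := pTest) (l := istr.toList) (acc := []))
  rw [hA, B_filter]
  set fs := istr.toList.filter pTest with hfs
  have hall : ∀ c ∈ fs, pTest c = true := fun c hc => List.of_mem_filter hc
  by_cases hne : fs = []
  · rw [if_pos hne, hne]
    simp
  · rw [if_neg hne]
    have hfound := bStep_found fs ([], [], false) hall hne
    rw [if_neg (by simp [hfound])]
    have hl : istr.toList ≠ [] := by
      intro h; apply hne; rw [hfs, h]; rfl
    cases hls : istr.toList with
    | nil => exact absurd hls hl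
    | cons c0 t =>
      have hget : PySem.List.pyGet? (c0 :: t) 0 = some c0 := by
        simp [PySem.List.pyGet?, PySem.List.pyIdx?]
      simp only [hget]
      congr 1
      have hBf := B_fold fs [] [] false hall
      rw [addFirst_nil _ (mysplit_ne_nil fs)] at hBf
      rw [PySem.List.foldl_append_eq_flatMap (g := padWhileA)]
      rw [splitOn_eq_mysplit]
      have : (mysplit fs).flatMap padWhileA
          = ((mysplit fs).map (fun s => PySem.Chars.zfill s 3)).flatten := by
        rw [List.flatMap_def]
        congr 1
        exact List.map_congr_left (fun s hs => seg_pad fs hall s hs)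
      simp [this, hBf]
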